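-- pv_equiv track=rewrite | github.com/kmatta0731/Intro-to-Python | CSC242/Homework/hw0.py | moreOdds
-- ===== SOURCE A (Python) =====
-- def moreOdds(Integers):
--     odds = []
--     evens = []
--     for i in range(len(Integers)):
--         if Integers[i] % 2 == 1:
--             #Help from 'codefather.tech' for %2 to find odds
--             odds.append(Integers[i])
--         else:
--             evens.append(Integers[i])
--     if len(odds) > len(evens):
--         return True
--     else:
--         return False
-- ===== SOURCE B (Python) =====
-- def _balance(xs):
--     # (#odds - #evens) of xs by divide and conquer
--     if len(xs) <= 1:
--         return 0 if not xs else (1 if xs[0] % 2 == 1 else -1)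
--     m = len(xs) // 2
--     return _balance(xs[:m]) + _balance(xs[m:])
--
-- def moreOdds(Integers):
--     return _balance(Integers) > 0
-- ===== Notes on version B (the rewrite author's own statement) =====
-- stated objective: alternative
-- what changed: Replaces the linear two-list classifying pass with a divide-and-conquer recursion computing the signed balance (#odds - #evens) of each half and returning balance > 0.
import Mathlib
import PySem

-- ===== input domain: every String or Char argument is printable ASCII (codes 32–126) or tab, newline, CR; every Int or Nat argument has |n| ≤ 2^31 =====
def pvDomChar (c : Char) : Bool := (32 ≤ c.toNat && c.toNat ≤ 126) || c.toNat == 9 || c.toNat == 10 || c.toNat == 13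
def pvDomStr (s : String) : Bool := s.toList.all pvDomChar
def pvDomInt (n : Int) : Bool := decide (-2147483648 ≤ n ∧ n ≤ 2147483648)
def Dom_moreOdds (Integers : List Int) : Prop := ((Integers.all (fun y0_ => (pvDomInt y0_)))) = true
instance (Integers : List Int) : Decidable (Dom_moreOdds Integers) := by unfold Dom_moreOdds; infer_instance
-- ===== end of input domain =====

-- B replaces A's linear two-list classifying pass by a divide-and-conquer signed
-- balance (#odds - #evens); alternative decomposition, same result, no speed claim.

-- ===== PORT A =====
-- Transliteration of A: index loop over range(len), appending into odds/evens lists,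
-- then comparing the lengths. Indices are always in range, so pyGetD's default 0 is never used.
def moreOdds (Integers : List Int) : Bool :=
  let st := (PySem.List.pyRange 0 Integers.length 1).foldl
    (fun (p : List Int × List Int) i =>
      let x := PySem.List.pyGetD Integers i 0
      if PySem.Int.mod x 2 == 1 then (p.1 ++ [x], p.2) else (p.1, p.2 ++ [x]))
    ([], [])
  if st.1.length > st.2.length then true else false

-- ===== PORT B =====
-- Transliteration of B's _balance: divide and conquer on halves. The slices
-- xs[:m] / xs[m:] with 0 ≤ m ≤ len(xs) are exactly List.take m / List.drop m,
-- and len(xs) // 2 on a Nat length is exactly Nat division.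
def pvBalance (xs : List Int) : Int :=
  if xs.length ≤ 1 then
    match xs with
    | [] => 0
    | x :: _ => if PySem.Int.mod x 2 == 1 then 1 else -1
  else
    let m := xs.length / 2
    pvBalance (xs.take m) + pvBalance (xs.drop m)
termination_by xs.length
decreasing_by
  · simp; omega
  · simp; omega

def moreOdds_alt (Integers : List Int) : Bool :=
  decide (pvBalance Integers > 0)

-- ===== PRECONDITION & SPEC =====
def Spec_moreOdds (Integers : List Int) (out : Bool) : Prop := out = moreOdds_alt Integers
instance (Integers : List Int) (out : Bool) : Decidable (Spec_moreOdds Integers out) := by unfold Spec_moreOdds; infer_instance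

-- ===== CLAIM (what is proved, stated in full; the proofs are below) =====
def Claim_equal_moreOdds : Prop := ∀ (Integers : List Int), Dom_moreOdds Integers → Spec_moreOdds Integers (moreOdds Integers)

-- ===== LEMMAS AND PROOFS =====

-- Loop invariant for A's fold: the accumulated lists are the odd / even elements so far.
theorem moreOdds_fold_lengths (xs : List Int) (o e : List Int) :
    (xs.foldl
      (fun (p : List Int × List Int) x =>
        if PySem.Int.mod x 2 == 1 then (p.1 ++ [x], p.2) else (p.1, p.2 ++ [x])) (o, e)) =
    (o ++ xs.filter (fun x => PySem.Int.mod x 2 == 1),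
     e ++ xs.filter (fun x => !(PySem.Int.mod x 2 == 1))) := by
  induction xs generalizing o e with
  | nil => simp
  | cons x t ih =>
    simp only [List.foldl_cons, List.filter_cons]
    by_cases h : PySem.Int.mod x 2 == 1 <;>
      simp only [h, if_true, Bool.not_true, Bool.not_false, Bool.false_eq_true, if_false, ih,
        List.append_assoc, List.singleton_append]

-- B's divide-and-conquer balance is the signed odd/even count difference.
theorem pvBalance_eq (xs : List Int) :
    pvBalance xs =
      (xs.countP (fun x => PySem.Int.mod x 2 == 1) : Int) -
      (xs.countP (fun x => !(PySem.Int.mod x 2 == 1)) : Int) := by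
  fun_induction pvBalance xs with
  | case1 h => simp
  | case2 x t hx h =>
    have ht : t = [] := List.eq_nil_of_length_eq_zero (Nat.le_zero.mp (by simpa using h))
    subst ht
    simp only [List.countP_cons, List.countP_nil, hx, Bool.not_true, Bool.false_eq_true,
      if_true, if_false]
    norm_num
  | case3 x t hx h =>
    have ht : t = [] := List.eq_nil_of_length_eq_zero (Nat.le_zero.mp (by simpa using h))
    subst ht
    have hx' : (PySem.Int.mod x 2 == 1) = false := by simpa using hx
    simp only [List.countP_cons, List.countP_nil, hx', Bool.not_false, Bool.false_eq_true,
      if_true, if_false]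
    norm_num
  | case4 xs h m ih1 ih2 =>
    have hsplit : xs.take m ++ xs.drop m = xs := List.take_append_drop m xs
    have h1 := List.countP_append (l₁ := xs.take m) (l₂ := xs.drop m)
      (p := fun x => PySem.Int.mod x 2 == 1)
    have h2 := List.countP_append (l₁ := xs.take m) (l₂ := xs.drop m)
      (p := fun x => !(PySem.Int.mod x 2 == 1))
    rw [hsplit] at h1 h2
    rw [ih1, ih2, h1, h2]
    push_cast
    ring

-- ===== VERDICT (by name: the statement is the Claim_ definition above) =====
theorem moreOdds_spec : Claim_equal_moreOdds := by
  intro xs _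
  unfold Spec_moreOdds moreOdds moreOdds_alt
  rw [PySem.List.foldl_pyRange_zero_pyGetD' xs 0
    (fun (p : List Int × List Int) x =>
      if PySem.Int.mod x 2 == 1 then (p.1 ++ [x], p.2) else (p.1, p.2 ++ [x])) ([], [])]
  rw [moreOdds_fold_lengths, pvBalance_eq]
  simp only [List.nil_append, ← List.countP_eq_length_filter]
  by_cases h : xs.countP (fun x => PySem.Int.mod x 2 == 1) >
      xs.countP (fun x => !(PySem.Int.mod x 2 == 1))
  · rw [if_pos h, eq_comm, decide_eq_true_iff]; omega
  · rw [if_neg h, eq_comm, decide_eq_false_iff_not]; omega
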